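-- pv_equiv track=rewrite | github.com/tomczykp/wordlist-gen | wordlist-gen.py | spongebobing
-- ===== SOURCE A (Python) =====
-- from typing import List
--
-- LIMIT = 15
--
-- def checkClose(t: str):
--     return LIMIT - 2 <= len(t) <= LIMIT + 2
--
-- def spongebobing(wordlist: List[str]) -> List[str]:
--     def all_casings(instr: str):
--         if not instr:
--             yield ""
--         else:
--             first = instr[:1]
--             for sub_casing in all_casings(instr[1:]):
--                 if first.isalpha():
--                     yield first.lower() + sub_casing
--                     yield first.upper() + sub_casing
--                 else:
--                     yield first + sub_casing
--     result: List[str] = []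
--     for word in wordlist:
--         result.extend([x for x in all_casings(word) if checkClose(x)])
--     return result
-- ===== SOURCE B (Python) =====
-- from typing import List
--
-- LIMIT = 15
--
-- def spongebobing(wordlist: List[str]) -> List[str]:
--     result: List[str] = []
--     for word in wordlist:
--         # every casing of `word` has the same length as `word`, so filter once per word
--         if LIMIT - 2 <= len(word) <= LIMIT + 2:
--             variants = [""]
--             for c in reversed(word):
--                 opts = [c.lower(), c.upper()] if c.isalpha() else [c]
--                 variants = [o + v for v in variants for o in opts]
--             result += variants
--     return result
-- ===== Notes on version B (the rewrite author's own statement) =====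
-- stated objective: faster
-- what changed: B tests the length filter once per word (casing preserves length) and skips out-of-range words entirely, building the surviving words' casings with an iterative back-to-front fold instead of A's recursive generator that enumerates all 2^k casings of every word and filters each one.
import Mathlib
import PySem

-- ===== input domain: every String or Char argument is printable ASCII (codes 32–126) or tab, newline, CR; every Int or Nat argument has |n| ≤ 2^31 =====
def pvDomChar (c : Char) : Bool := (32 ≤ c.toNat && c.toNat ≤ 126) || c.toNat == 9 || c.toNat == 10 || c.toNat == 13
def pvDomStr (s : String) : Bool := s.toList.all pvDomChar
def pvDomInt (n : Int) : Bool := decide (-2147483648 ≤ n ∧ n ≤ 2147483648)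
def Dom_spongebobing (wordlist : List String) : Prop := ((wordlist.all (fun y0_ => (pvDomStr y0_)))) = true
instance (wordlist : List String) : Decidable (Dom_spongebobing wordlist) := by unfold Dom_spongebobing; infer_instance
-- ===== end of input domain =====

-- B skips whole words whose length is outside LIMIT±2 (every casing keeps the word's
-- length) and builds the casings iteratively back-to-front instead of A's recursive
-- generator that enumerates all casings and then filters each one.

-- ===== PORT A =====
-- all_casings: recursive generator, first char varies fastest
def pvAllCasings : List Char → List (List Char)
  | [] => [[]]
  | c :: rest =>
      (pvAllCasings rest).flatMap (fun sub =>
        if PySem.Chars.isalpha c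
        then [PySem.Chars.lowerChar c :: sub, PySem.Chars.upperChar c :: sub]
        else [c :: sub])

def pvCheckClose (t : List Char) : Bool :=
  decide (15 - 2 ≤ PySem.Chars.len t ∧ PySem.Chars.len t ≤ 15 + 2)

def spongebobing (wordlist : List String) : List String :=
  wordlist.foldl
    (fun result word =>
      result ++ ((pvAllCasings word.toList).filter pvCheckClose).map String.ofList)
    []

-- ===== PORT B =====
def pvOptsB (c : Char) : List Char :=
  if PySem.Chars.isalpha c then [PySem.Chars.lowerChar c, PySem.Chars.upperChar c] else [c]

def pvVariants (word : List Char) : List (List Char) :=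
  word.reverse.foldl
    (fun variants c => variants.flatMap (fun v => (pvOptsB c).map (fun o => o :: v)))
    [[]]

def spongebobing_alt (wordlist : List String) : List String :=
  wordlist.foldl
    (fun result word =>
      if 15 - 2 ≤ PySem.Chars.len word.toList ∧ PySem.Chars.len word.toList ≤ 15 + 2
      then result ++ (pvVariants word.toList).map String.ofList
      else result)
    []

-- ===== PRECONDITION & SPEC =====
def Spec_spongebobing (wordlist : List String) (out : List String) : Prop := out = spongebobing_alt wordlist
instance (wordlist : List String) (out : List String) : Decidable (Spec_spongebobing wordlist out) := by unfold Spec_spongebobing; infer_instance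

-- ===== CLAIM (what is proved, stated in full; the proofs are below) =====
def Claim_equal_spongebobing : Prop := ∀ (wordlist : List String), Dom_spongebobing wordlist → Spec_spongebobing wordlist (spongebobing wordlist)

-- ===== LEMMAS AND PROOFS =====

-- every casing has the length of the original word
theorem pvAllCasings_length (l : List Char) :
    ∀ x ∈ pvAllCasings l, x.length = l.length := by
  induction l with
  | nil => simp [pvAllCasings]
  | cons c t ih =>
      intro x hx
      simp only [pvAllCasings, List.mem_flatMap] at hx
      obtain ⟨sub, hsub, hx⟩ := hx
      by_cases h : PySem.Chars.isalpha c
      · simp [h] at hx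
        rcases hx with rfl | rfl <;> simp [ih sub hsub]
      · simp [h] at hx
        subst hx
        simp [ih sub hsub]

-- B's iterative construction equals A's recursion
theorem pvVariants_eq (l : List Char) : pvVariants l = pvAllCasings l := by
  induction l with
  | nil => simp [pvVariants, pvAllCasings]
  | cons c t ih =>
      have : pvVariants (c :: t)
          = (pvVariants t).flatMap (fun v => (pvOptsB c).map (fun o => o :: v)) := by
        simp [pvVariants, List.reverse_cons, List.foldl_append]
      rw [this, ih]
      show _ = pvAllCasings (c :: t)
      simp only [pvAllCasings]
      apply List.flatMap_congr
      intro v _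
      unfold pvOptsB
      split <;> simp

-- per-word block equality
theorem pvBlock_eq (w : List Char) :
    ((pvAllCasings w).filter pvCheckClose).map String.ofList
      = if 15 - 2 ≤ PySem.Chars.len w ∧ PySem.Chars.len w ≤ 15 + 2
        then (pvVariants w).map String.ofList else [] := by
  rw [pvVariants_eq]
  by_cases h : 15 - 2 ≤ PySem.Chars.len w ∧ PySem.Chars.len w ≤ 15 + 2
  · rw [if_pos h]
    congr 1
    apply List.filter_eq_self.mpr
    intro x hx
    simp [pvCheckClose, PySem.Chars.len_eq, pvAllCasings_length w x hx]
    simp [PySem.Chars.len_eq] at h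
    omega
  · rw [if_neg h]
    have : (pvAllCasings w).filter pvCheckClose = [] := by
      apply List.filter_eq_nil_iff.mpr
      intro x hx
      simp [pvCheckClose, PySem.Chars.len_eq, pvAllCasings_length w x hx]
      simp [PySem.Chars.len_eq] at h
      omega
    simp [this]

theorem pvFoldl_eq (wl : List String) (init : List String) :
    wl.foldl (fun result word =>
        result ++ ((pvAllCasings word.toList).filter pvCheckClose).map String.ofList) init
      = wl.foldl (fun result word =>
          if 15 - 2 ≤ PySem.Chars.len word.toList ∧ PySem.Chars.len word.toList ≤ 15 + 2
          then result ++ (pvVariants word.toList).map String.ofList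
          else result) init := by
  induction wl generalizing init with
  | nil => rfl
  | cons w t ih =>
      simp only [List.foldl_cons]
      rw [pvBlock_eq]
      split <;> simp [ih]

-- ===== VERDICT (by name: the statement is the Claim_ definition above) =====
theorem spongebobing_spec : Claim_equal_spongebobing := by
  intro wl _
  show spongebobing wl = spongebobing_alt wl
  unfold spongebobing spongebobing_alt
  exact pvFoldl_eq wl []
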